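-- pv_equiv track=rewrite | github.com/pypi-data/pypi-mirror-402 | packages/sciplex-core/sciplex_core-0.1.2.tar.gz/sciplex_core-0.1.2/libraries/default/_helpers.py | assign_name
-- ===== SOURCE A (Python) =====
-- def assign_name(column_names, base_name):
--     """Assigns a unique name to a column.
--
--     Args:
--         column_names (list): A list of column names.
--         base_name (str): The base name for the column.
--
--     Returns:
--         str: A unique name for the column.
--     """
--     i = 0
--     proposed_name = base_name
--     if proposed_name in column_names:
--         while True:
--             proposed_name = base_name + '_' + str(i)
--             if proposed_name in column_names:
--                 i += 1
--             else:
--                 break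
--     return proposed_name
-- ===== SOURCE B (Python) =====
-- def assign_name(column_names, base_name):
--     """Assigns a unique name to a column.
--
--     One pass over column_names collects the set of suffixes already used under
--     'base_name_'; the answer is then the minimum index in 0..len(column_names)
--     whose decimal suffix is not taken (such an index always exists by pigeonhole).
--     """
--     if base_name not in column_names:
--         return base_name
--     prefix = base_name + '_'
--     taken = {name[len(prefix):] for name in column_names if name.startswith(prefix)}
--     free = min(i for i in range(len(column_names) + 1) if str(i) not in taken)
--     return prefix + str(free)
-- ===== Notes on version B (the rewrite author's own statement) =====
-- stated objective: alternative
-- what changed: Instead of testing candidates one at a time against the list (base, base_0, base_1, ... with a manual counter), B makes one pass collecting the suffixes already used under 'base_name_' into a set and returns the minimum free index in 0..len(column_names), so the repeated list scans per candidate disappear.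
import Mathlib
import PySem

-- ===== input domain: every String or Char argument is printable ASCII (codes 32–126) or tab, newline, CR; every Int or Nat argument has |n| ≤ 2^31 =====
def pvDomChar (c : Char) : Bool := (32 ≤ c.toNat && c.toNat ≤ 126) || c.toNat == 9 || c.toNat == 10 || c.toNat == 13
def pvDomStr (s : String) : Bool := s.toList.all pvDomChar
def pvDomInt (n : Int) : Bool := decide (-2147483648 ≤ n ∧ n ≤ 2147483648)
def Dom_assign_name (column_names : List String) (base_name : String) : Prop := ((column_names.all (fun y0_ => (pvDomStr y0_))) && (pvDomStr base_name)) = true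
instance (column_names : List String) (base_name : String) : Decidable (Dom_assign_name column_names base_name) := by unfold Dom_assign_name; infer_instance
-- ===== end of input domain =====

-- B replaces A's one-candidate-at-a-time search (each probe scanning the list) by a single pass
-- that collects the suffixes already used under 'base_name_' into a set, then takes the minimum
-- free index in 0..len(column_names); same value, different algorithm.

-- ===== PORT A =====
-- A's 'while True' loop; Python's loop is unbounded, the fuel only expresses it in Lean:
-- fuel column_names.length + 1 is provably never exhausted (pigeonhole over distinct candidates),
-- so the fuel-0 value is never returned.
def assign_name_loop (column_names : List String) (base_name : String) (i : Nat) : Nat → String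
  | 0 => base_name ++ "_" ++ PySem.Int.toStr (i : Int)
  | fuel + 1 =>
    let proposed_name := base_name ++ "_" ++ PySem.Int.toStr (i : Int)
    if proposed_name ∈ column_names then
      assign_name_loop column_names base_name (i + 1) fuel
    else
      proposed_name

def assign_name (column_names : List String) (base_name : String) : String :=
  let proposed_name := base_name
  if proposed_name ∈ column_names then
    assign_name_loop column_names base_name 0 (column_names.length + 1)
  else
    proposed_name

-- ===== PORT B =====
-- B's set comprehension of used suffixes, then min() over the free indices of
-- range(len(column_names) + 1); the generator is provably nonempty (pigeonhole), so the
-- [] branch — Python's min()-of-empty ValueError — is never taken.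
def assign_name_alt (column_names : List String) (base_name : String) : String :=
  if column_names.contains base_name then
    let pre := base_name ++ "_"
    let taken : PySem.Set String := PySem.Set.ofList
      ((column_names.filter (fun name => PySem.Str.startswith name pre)).map
        (fun name => PySem.Str.slice name (some (PySem.Str.len pre)) none))
    match (PySem.List.pyRange 0 ((column_names.length : Int) + 1) 1).filter
        (fun i => !(taken.contains (PySem.Int.toStr i))) with
    | [] => base_name
    | h :: t => pre ++ PySem.Int.toStr (t.foldl min h)
  else base_name

-- ===== PRECONDITION & SPEC =====
def Spec_assign_name (column_names : List String) (base_name : String) (out : String) : Prop := out = assign_name_alt column_names base_name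
instance (column_names : List String) (base_name : String) (out : String) : Decidable (Spec_assign_name column_names base_name out) := by unfold Spec_assign_name; infer_instance

-- ===== CLAIM (what is proved, stated in full; the proofs are below) =====
def Claim_equal_assign_name : Prop := ∀ (column_names : List String) (base_name : String), Dom_assign_name column_names base_name → Spec_assign_name column_names base_name (assign_name column_names base_name)

-- ===== LEMMAS AND PROOFS =====

-- the i-th numbered candidate name: base_name + '_' + str(i)
def pvCand (base_name : String) (i : Nat) : String :=
  base_name ++ "_" ++ PySem.Int.toStr (i : Int)

-- decimal value of a digit character
def pvStep (a : Nat) (c : Char) : Nat := a * 10 + (c.toNat - 48)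

-- what folding pvStep over the decimal digits of n appended after accumulator a yields
def pvAcc (a n : Nat) : Nat :=
  if n < 10 then a * 10 + n else pvAcc a (n / 10) * 10 + n % 10
termination_by n
decreasing_by exact Nat.div_lt_self (by omega) (by omega)

theorem pvStep_digitChar (a d : Nat) (h : d < 10) :
    pvStep a (Nat.digitChar d) = a * 10 + d := by
  interval_cases d <;> rfl

theorem pv_foldl_toDigitsCore (fuel : Nat) :
    ∀ (n : Nat) (ds : List Char) (a : Nat), n < fuel →
      List.foldl pvStep a (Nat.toDigitsCore 10 fuel n ds) =
        List.foldl pvStep (pvAcc a n) ds := by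
  induction fuel with
  | zero => intro n ds a h; omega
  | succ fuel ih =>
    intro n ds a h
    rw [Nat.toDigitsCore]
    by_cases h0 : n / 10 = 0
    · have hn : n < 10 := by omega
      rw [if_pos h0, List.foldl_cons,
        pvStep_digitChar a (n % 10) (Nat.mod_lt _ (by omega)), pvAcc]
      rw [if_pos hn, Nat.mod_eq_of_lt hn]
    · have hn : ¬ n < 10 := by omega
      have hlt : n / 10 < fuel := by
        have := Nat.div_lt_self (n := n) (by omega) (by omega : 1 < 10)
        omega
      rw [if_neg h0, ih (n / 10) _ a hlt, List.foldl_cons,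
        pvStep_digitChar _ (n % 10) (Nat.mod_lt _ (by omega))]
      conv_rhs => rw [pvAcc]
      rw [if_neg hn]

theorem pvAcc_zero (n : Nat) : pvAcc 0 n = n := by
  induction n using Nat.strong_induction_on with
  | _ n ih =>
    rw [pvAcc]
    by_cases h : n < 10
    · simp [h]
    · have : n / 10 < n := Nat.div_lt_self (by omega) (by omega)
      simp only [h, if_false]
      rw [ih _ this]
      omega

theorem toDigits_inj {m n : Nat} (h : Nat.toDigits 10 m = Nat.toDigits 10 n) : m = n := by
  have hm : List.foldl pvStep 0 (Nat.toDigits 10 m) = m := by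
    rw [Nat.toDigits, pv_foldl_toDigitsCore (m + 1) m [] 0 (by omega)]
    simp [pvAcc_zero]
  have hn : List.foldl pvStep 0 (Nat.toDigits 10 n) = n := by
    rw [Nat.toDigits, pv_foldl_toDigitsCore (n + 1) n [] 0 (by omega)]
    simp [pvAcc_zero]
  rw [← hm, h, hn]

theorem pvCand_injective (base_name : String) : Function.Injective (pvCand base_name) := by
  intro i j h
  unfold pvCand at h
  have h' := congrArg String.toList h
  have h2 : (PySem.Int.toStr (i : Int)).toList = (PySem.Int.toStr (j : Int)).toList := by
    simpa [String.toList_append, List.append_assoc] using h'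
  simp only [PySem.Int.toList_toStr, PySem.Int.toChars] at h2
  have hi : ¬ ((i : Int) < 0) := by omega
  have hj : ¬ ((j : Int) < 0) := by omega
  rw [if_neg hi, if_neg hj, Int.toNat_natCast, Int.toNat_natCast] at h2
  exact toDigits_inj h2

-- among the first column_names.length + 1 numbered candidates, one is free (pigeonhole)
theorem pv_exists_free (column_names : List String) (base_name : String) :
    ∃ i ∈ List.range (column_names.length + 1),
      pvCand base_name i ∉ column_names := by
  by_contra hall
  push Not at hall
  have hsub : (List.range (column_names.length + 1)).map (pvCand base_name) ⊆ column_names := by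
    intro c hc
    obtain ⟨i, hi, rfl⟩ := List.mem_map.mp hc
    exact hall i hi
  have hnd : ((List.range (column_names.length + 1)).map (pvCand base_name)).Nodup :=
    (List.nodup_range).map (pvCand_injective base_name)
  have := (List.subperm_of_subset hnd hsub).length_le
  simp at this

-- A's loop is the first free candidate in the numbered stream from i on
theorem pv_loop_eq_find (column_names : List String) (base_name : String) :
    ∀ (fuel i : Nat),
      assign_name_loop column_names base_name i fuel =
        (((List.range' i fuel).map (pvCand base_name)).find?
            (fun c => !column_names.contains c)).getD (pvCand base_name (i + fuel)) := by
  intro fuel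
  induction fuel with
  | zero => intro i; simp [assign_name_loop, pvCand]
  | succ fuel ih =>
    intro i
    rw [List.range'_succ, List.map_cons, List.find?_cons]
    by_cases h : pvCand base_name i ∈ column_names
    · have hp : (!column_names.contains (pvCand base_name i)) = false := by
        simp [h]
      rw [hp]
      simp only [assign_name_loop]
      rw [show (base_name ++ "_" ++ PySem.Int.toStr (i : Int)) = pvCand base_name i from rfl,
        if_pos h, ih (i + 1)]
      congr 2
      omega
    · have hp : (!column_names.contains (pvCand base_name i)) = true := by
        simp [h]
      rw [hp]
      simp only [assign_name_loop]
      rw [show (base_name ++ "_" ++ PySem.Int.toStr (i : Int)) = pvCand base_name i from rfl,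
        if_neg h]
      rfl

-- str(i) is in B's suffix set exactly when the i-th candidate is a column name
theorem pv_taken_iff (column_names : List String) (base_name : String) (i : Nat) :
    (PySem.Int.toStr (i : Int)) ∈
      ((column_names.filter (fun name => PySem.Str.startswith name (base_name ++ "_"))).map
        (fun name => PySem.Str.slice name (some (PySem.Str.len (base_name ++ "_"))) none))
    ↔ pvCand base_name i ∈ column_names := by
  constructor
  · rintro hmem
    obtain ⟨name, hf, hsl⟩ := List.mem_map.mp hmem
    obtain ⟨hname, hsw⟩ := List.mem_filter.mp hf
    have hpre : (base_name ++ "_").toList <+: name.toList := by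
      have := (PySem.Str.startswith_eq name (base_name ++ "_")) ▸ hsw
      exact (PySem.Chars.startswith_iff _ _).mp this
    obtain ⟨rest, hrest⟩ := hpre
    have hslL := congrArg String.toList hsl
    rw [PySem.Str.toList_slice, PySem.Str.len_eq, PySem.Chars.slice_eq_listSlice,
      PySem.List.slice_from_natCast, ← hrest, List.drop_left] at hslL
    have : name.toList = (pvCand base_name i).toList := by
      rw [← hrest, hslL]
      simp [pvCand, String.toList_append, List.append_assoc]
    rwa [String.toList_inj.mp this] at hname
  · intro hmem
    refine List.mem_map.mpr ⟨pvCand base_name i, List.mem_filter.mpr ⟨hmem, ?_⟩, ?_⟩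
    · rw [PySem.Str.startswith_eq]
      refine (PySem.Chars.startswith_iff _ _).mpr ⟨(PySem.Int.toStr (i : Int)).toList, ?_⟩
      simp [pvCand, String.toList_append, List.append_assoc]
    · apply String.toList_inj.mp
      rw [PySem.Str.toList_slice, PySem.Str.len_eq, PySem.Chars.slice_eq_listSlice,
        PySem.List.slice_from_natCast]
      have : (pvCand base_name i).toList =
          (base_name ++ "_").toList ++ (PySem.Int.toStr (i : Int)).toList := by
        simp [pvCand, String.toList_append, List.append_assoc]
      rw [this, List.drop_left]

-- str(k) is in B's suffix set exactly when the k-th candidate is a column name (Bool form)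
theorem pv_contains_eq (column_names : List String) (base_name : String) (k : Nat) :
    (PySem.Set.ofList
      ((column_names.filter (fun name => PySem.Str.startswith name (base_name ++ "_"))).map
        (fun name => PySem.Str.slice name (some (PySem.Str.len (base_name ++ "_"))) none))).contains
      (PySem.Int.toStr (k : Int)) = column_names.contains (pvCand base_name k) := by
  have h1 : ∀ (l : List String) (x : String),
      (PySem.Set.ofList l).contains x = l.contains x := by
    intro l x; simp [pysem]
  rw [h1, Bool.eq_iff_iff]
  simp only [List.contains_iff_mem]
  exact pv_taken_iff column_names base_name k

-- B's filtered candidate-index stream, as a filter over List.range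
theorem pv_alt_filter (column_names : List String) (base_name : String) :
    (PySem.List.pyRange 0 ((column_names.length : Int) + 1) 1).filter
        (fun i => !((PySem.Set.ofList
          ((column_names.filter (fun name => PySem.Str.startswith name (base_name ++ "_"))).map
            (fun name => PySem.Str.slice name (some (PySem.Str.len (base_name ++ "_"))) none))).contains
          (PySem.Int.toStr i))) =
      ((List.range (column_names.length + 1)).filter
        (fun i => !(column_names.contains (pvCand base_name i)))).map (fun k : Nat => (k : Int)) := by
  rw [PySem.List.pyRange_zero]
  have hcast : ((column_names.length : Int) + 1).toNat = column_names.length + 1 := by omega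
  rw [hcast, List.filter_map]
  congr 1
  apply List.filter_congr
  intro a _
  simp only [Function.comp_apply]
  exact congrArg (fun b => !b) (pv_contains_eq column_names base_name a)

-- min() of a list whose head is below every later element
theorem pv_foldl_min_head {h : Int} {t : List Int} (hle : ∀ x ∈ t, h ≤ x) :
    t.foldl min h = h := by
  induction t with
  | nil => rfl
  | cons a t ih =>
    rw [List.foldl_cons, min_eq_left (hle a (by simp))]
    exact ih fun x hx => hle x (List.mem_cons_of_mem _ hx)

-- ===== VERDICT (by name: the statement is the Claim_ definition above) =====
theorem assign_name_spec : Claim_equal_assign_name := by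
  intro column_names base_name _
  unfold Spec_assign_name
  by_cases hb : base_name ∈ column_names
  · have hbc : column_names.contains base_name = true := by simpa using hb
    simp only [assign_name, assign_name_alt, if_pos hb, hbc, if_true]
    rw [pv_loop_eq_find, ← List.range_eq_range', List.find?_map, pv_alt_filter]
    have hcomp : ((fun c => !column_names.contains c) ∘ pvCand base_name) =
        fun i : Nat => !(column_names.contains (pvCand base_name i)) := rfl
    rw [hcomp]
    obtain ⟨i0, hi0mem, hi0⟩ := pv_exists_free column_names base_name
    have hsome : ((List.range (column_names.length + 1)).find?
        (fun i => !(column_names.contains (pvCand base_name i)))).isSome := by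
      rw [List.find?_isSome]
      exact ⟨i0, hi0mem, by simpa using hi0⟩
    rcases hfe : (List.range (column_names.length + 1)).filter
        (fun i => !(column_names.contains (pvCand base_name i))) with _ | ⟨h0, t0⟩
    · rw [← List.head?_filter, hfe] at hsome
      simp at hsome
    · have hfind : (List.range (column_names.length + 1)).find?
          (fun i => !(column_names.contains (pvCand base_name i))) = some h0 := by
        rw [← List.head?_filter, hfe]; rfl
      rw [hfind, List.map_cons]
      simp only [Option.map_some, Option.getD_some]
      have hpw0 : ((List.range (column_names.length + 1)).filter
          (fun i => !(column_names.contains (pvCand base_name i)))).Pairwise (· < ·) :=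
        List.Pairwise.sublist List.filter_sublist List.pairwise_lt_range
      rw [hfe] at hpw0
      have hle : ∀ x ∈ t0.map (fun k : Nat => (k : Int)), (h0 : Int) ≤ x := by
        intro x hx
        obtain ⟨k, hk, rfl⟩ := List.mem_map.mp hx
        exact_mod_cast le_of_lt ((List.pairwise_cons.mp hpw0).1 k hk)
      show pvCand base_name h0 =
        base_name ++ "_" ++ PySem.Int.toStr (List.foldl min ((h0 : Nat) : Int)
          (t0.map (fun k : Nat => (k : Int))))
      rw [pv_foldl_min_head hle]
      rfl
  · simp [assign_name, assign_name_alt, hb]
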